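-- pv_equiv track=rewrite | github.com/rf-iasys/OEIS | OEIS_A004431.py | compute_max_y
-- ===== SOURCE A (Python) =====
-- import math
--
-- def compute_max_y(n_start: int, n_end: int) -> dict[int,int]:
--     """
--     Compute max_y(x) using the combinatorial formula; return as dict.
--     """
--     max_y_per_x = dict()
--     n_isqrt = math.isqrt(n_end)
--     for a in range(n_end // 2):
--         for b in range(a + 1, a + 1 + n_isqrt):
--             x = a**2 + b**2
--             y = x * abs(x - (a + b)**2)
--
--             if y == 0:
--                 continue
--             if n_start <= x < n_end:
--                 if y > max_y_per_x.get(x, 0):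
--                     max_y_per_x[x] = y
--     return max_y_per_x
-- ===== SOURCE B (Python) =====
-- import math
--
-- def compute_max_y(n_start: int, n_end: int) -> dict[int, int]:
--     """
--     Same result, but walk only 1 <= a < b <= isqrt(n_end) with explicit while
--     loops (any larger coordinate gives x >= n_end, so A's longer ranges add
--     nothing) and use y = 2*a*b*x directly, since (a+b)**2 - (a**2+b**2) = 2ab.
--     """
--     res = {}
--     r = math.isqrt(n_end)
--     a = 1
--     while a <= r:
--         b = a + 1
--         while b <= r:
--             x = a * a + b * b
--             if n_start <= x < n_end:
--                 y = 2 * a * b * x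
--                 if res.get(x, 0) < y:
--                     res[x] = y
--             b += 1
--         a += 1
--     return res
-- ===== Notes on version B (the rewrite author's own statement) =====
-- stated objective: faster
-- what changed: B walks only the pairs 1 <= a < b <= isqrt(n_end) with explicit while loops (A's outer loop to n_end//2 and overlong inner ranges contribute nothing because larger coordinates give x >= n_end) and computes y = 2*a*b*x directly instead of x*abs(x-(a+b)**2), dropping the y==0 check.
import Mathlib
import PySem

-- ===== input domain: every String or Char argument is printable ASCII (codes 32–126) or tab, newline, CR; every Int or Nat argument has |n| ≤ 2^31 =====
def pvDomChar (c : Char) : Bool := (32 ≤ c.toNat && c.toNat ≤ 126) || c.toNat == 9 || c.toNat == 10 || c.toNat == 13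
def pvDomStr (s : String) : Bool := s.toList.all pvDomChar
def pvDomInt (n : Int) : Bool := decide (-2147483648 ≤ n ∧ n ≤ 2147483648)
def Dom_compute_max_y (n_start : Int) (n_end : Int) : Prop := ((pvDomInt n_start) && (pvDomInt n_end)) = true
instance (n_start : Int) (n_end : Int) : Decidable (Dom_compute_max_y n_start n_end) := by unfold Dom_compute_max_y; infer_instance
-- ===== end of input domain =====

-- B walks only 1 ≤ a < b ≤ isqrt(n_end) with explicit while loops (A's longer ranges
-- contribute nothing) and computes y = 2*a*b*x directly; measurably faster (asymptotic).
-- A mutates nothing; equivalence is about the returned dict (insertion-ordered assoc list).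

-- math.isqrt(n) for 0 ≤ n (Pre_ excludes n < 0, where Python raises ValueError)
def pyIsqrt (n : Int) : Int := (Nat.sqrt n.toNat : Int)

-- ===== PORT A =====
-- body of A's inner loop
def stepA (n_start n_end : Int) (d : PySem.Dict Int Int) (a b : Int) : PySem.Dict Int Int :=
  let x := a ^ 2 + b ^ 2
  let y := x * |x - (a + b) ^ 2|
  if y = 0 then d
  else if n_start ≤ x ∧ x < n_end then
    if y > d.getD x 0 then d.insert x y else d
  else d

def compute_max_y (n_start : Int) (n_end : Int) : List (Int × Int) :=
  let n_isqrt := pyIsqrt n_end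
  ((PySem.List.pyRange 0 (PySem.Int.floordiv n_end 2) 1).foldl
      (fun d a =>
        (PySem.List.pyRange (a + 1) (a + 1 + n_isqrt) 1).foldl
          (fun d b => stepA n_start n_end d a b) d)
      PySem.Dict.empty).items

-- ===== PORT B =====
-- body of B's inner while loop
def updateB (n_start n_end : Int) (d : PySem.Dict Int Int) (a b : Int) : PySem.Dict Int Int :=
  let x := a * a + b * b
  if n_start ≤ x ∧ x < n_end then
    let y := 2 * a * b * x
    if d.getD x 0 < y then d.insert x y else d
  else d

-- the inner 'while b <= r' loop
def innerB (n_start n_end r a b : Int) (d : PySem.Dict Int Int) : PySem.Dict Int Int :=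
  if _h : b ≤ r then innerB n_start n_end r a (b + 1) (updateB n_start n_end d a b) else d
termination_by (r + 1 - b).toNat
decreasing_by omega

-- the outer 'while a <= r' loop
def outerB (n_start n_end r a : Int) (d : PySem.Dict Int Int) : PySem.Dict Int Int :=
  if _h : a ≤ r then outerB n_start n_end r (a + 1) (innerB n_start n_end r a (a + 1) d) else d
termination_by (r + 1 - a).toNat
decreasing_by omega

def compute_max_y_alt (n_start : Int) (n_end : Int) : List (Int × Int) :=
  (outerB n_start n_end (pyIsqrt n_end) 1 PySem.Dict.empty).items

-- ===== PRECONDITION & SPEC =====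
-- Pre_ excludes n_end < 0, where A's math.isqrt(n_end) raises ValueError (B raises there too).
def Pre_compute_max_y (n_start : Int) (n_end : Int) : Prop := 0 ≤ n_end
instance (n_start : Int) (n_end : Int) : Decidable (Pre_compute_max_y n_start n_end) := by unfold Pre_compute_max_y; infer_instance
def pvWitness_compute_max_y : Int × Int := (1, 50)

def Spec_compute_max_y (n_start : Int) (n_end : Int) (out : List (Int × Int)) : Prop := out = compute_max_y_alt n_start n_end
instance (n_start : Int) (n_end : Int) (out : List (Int × Int)) : Decidable (Spec_compute_max_y n_start n_end out) := by unfold Spec_compute_max_y; infer_instance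

-- ===== CLAIM (what is proved, stated in full; the proofs are below) =====
def Claim_equal_compute_max_y : Prop := ∀ (n_start : Int) (n_end : Int), Dom_compute_max_y n_start n_end → Pre_compute_max_y n_start n_end → Spec_compute_max_y n_start n_end (compute_max_y n_start n_end)

-- ===== LEMMAS AND PROOFS =====

-- B's while loops unrolled to folds over the corresponding ranges
theorem innerB_eq_fold (n_start n_end r a : Int) : ∀ (b : Int) (d : PySem.Dict Int Int),
    innerB n_start n_end r a b d
    = (PySem.List.pyRange b (r + 1) 1).foldl (fun d b => updateB n_start n_end d a b) d := by
  intro b d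
  by_cases h : b ≤ r
  · rw [innerB, dif_pos h, PySem.List.pyRange_one_cons (by omega : b < r + 1)]
    simp only [List.foldl_cons]
    exact innerB_eq_fold n_start n_end r a (b + 1) _
  · rw [innerB, dif_neg h, PySem.List.pyRange_one_eq_nil (by omega : r + 1 ≤ b)]
    rfl
termination_by b => (r + 1 - b).toNat
decreasing_by omega

theorem outerB_eq_fold (n_start n_end r : Int) : ∀ (a : Int) (d : PySem.Dict Int Int),
    outerB n_start n_end r a d
    = (PySem.List.pyRange a (r + 1) 1).foldl
        (fun d a => innerB n_start n_end r a (a + 1) d) d := by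
  intro a d
  by_cases h : a ≤ r
  · rw [outerB, dif_pos h, PySem.List.pyRange_one_cons (by omega : a < r + 1)]
    simp only [List.foldl_cons]
    exact outerB_eq_fold n_start n_end r (a + 1) _
  · rw [outerB, dif_neg h, PySem.List.pyRange_one_eq_nil (by omega : r + 1 ≤ a)]
    rfl
termination_by a => (r + 1 - a).toNat
decreasing_by omega

-- a fold whose step fixes every accumulator is the identity
theorem foldl_fix {α β : Type} (l : List β) (f : α → β → α) (init : α)
    (h : ∀ x ∈ l, ∀ d, f d x = d) : l.foldl f init = init := by
  induction l generalizing init with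
  | nil => rfl
  | cons x t ih =>
      simp only [List.foldl_cons, h x (by simp)]
      exact ih init (fun y hy d => h y (List.mem_cons_of_mem x hy) d)

theorem stepA_noop (n_start n_end : Int) (d : PySem.Dict Int Int) (a b : Int)
    (h : ¬ a ^ 2 + b ^ 2 < n_end) : stepA n_start n_end d a b = d := by
  simp only [stepA]
  split_ifs with h1 h2 h3 <;> first | rfl | exact absurd h2.2 h

theorem stepA_zero (n_start n_end : Int) (d : PySem.Dict Int Int) (b : Int) :
    stepA n_start n_end d 0 b = d := by
  simp only [stepA]
  norm_num

theorem step_eq (n_start n_end : Int) (d : PySem.Dict Int Int) (a b : Int)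
    (ha : 1 ≤ a) (hb : a < b) : stepA n_start n_end d a b = updateB n_start n_end d a b := by
  have ha0 : (0 : Int) < a := by omega
  have hb0 : (0 : Int) < b := by omega
  simp only [stepA, updateB]
  have hxy : (a ^ 2 + b ^ 2) * |a ^ 2 + b ^ 2 - (a + b) ^ 2| = 2 * a * b * (a * a + b * b) := by
    have h1 : a ^ 2 + b ^ 2 - (a + b) ^ 2 = -(2 * a * b) := by ring
    rw [h1, abs_neg, abs_of_nonneg (by positivity)]
    ring
  have hsq : a ^ 2 + b ^ 2 = a * a + b * b := by ring
  rw [hxy, hsq]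
  have hne : ¬ 2 * a * b * (a * a + b * b) = 0 := by
    have hx0 : (0 : Int) < a * a + b * b := by positivity
    exact ne_of_gt (by positivity)
  rw [if_neg hne]

-- b > isqrt(n_end) makes x ≥ n_end (so A's step is a no-op there)
theorem b_big (n_end a b : Int) (hn : 0 ≤ n_end) (hb : pyIsqrt n_end < b) :
    ¬ a ^ 2 + b ^ 2 < n_end := by
  have h1 : n_end.toNat < (Nat.sqrt n_end.toNat + 1) ^ 2 := Nat.lt_succ_sqrt' n_end.toNat
  have h2 : (n_end : Int) < ((Nat.sqrt n_end.toNat : Int) + 1) ^ 2 := by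
    have h3 := h1
    zify at h3
    rwa [Int.toNat_of_nonneg hn] at h3
  have hb' : (Nat.sqrt n_end.toNat : Int) + 1 ≤ b := by
    have : pyIsqrt n_end = (Nat.sqrt n_end.toNat : Int) := rfl
    omega
  nlinarith [sq_nonneg a, h2, hb']

-- a ≥ n_end // 2 and b > a make x ≥ n_end
theorem a_big (n_end a b : Int) (ha0 : 0 ≤ a) (ha : PySem.Int.floordiv n_end 2 ≤ a)
    (hb : a < b) : ¬ a ^ 2 + b ^ 2 < n_end := by
  have h1 := PySem.Int.floordiv_mul_add_mod n_end 2
  have h2 := PySem.Int.mod_lt n_end (b := 2) (by norm_num)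
  nlinarith

-- A's inner fold agrees with B's inner while loop for every a ≥ 1
theorem inner_eq (n_start n_end : Int) (hn : 0 ≤ n_end) (a : Int) (ha : 1 ≤ a)
    (d : PySem.Dict Int Int) :
    (PySem.List.pyRange (a + 1) (a + 1 + pyIsqrt n_end) 1).foldl
        (fun d b => stepA n_start n_end d a b) d
    = innerB n_start n_end (pyIsqrt n_end) a (a + 1) d := by
  rw [innerB_eq_fold]
  set r := pyIsqrt n_end with hr
  have hr0 : 0 ≤ r := by simp [hr, pyIsqrt]
  by_cases har : a ≤ r
  · rw [PySem.List.pyRange_one_append (a + 1) (r + 1) (a + 1 + r) (by omega) (by omega),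
      List.foldl_append]
    have h1 : (PySem.List.pyRange (a + 1) (r + 1) 1).foldl
        (fun d b => stepA n_start n_end d a b) d
        = (PySem.List.pyRange (a + 1) (r + 1) 1).foldl
        (fun d b => updateB n_start n_end d a b) d := by
      refine PySem.List.foldl_congr_mem _ _ _ _ ?_
      intro acc b hbmem
      have hbm := (PySem.List.mem_pyRange_one).1 hbmem
      exact step_eq n_start n_end acc a b ha (by omega)
    rw [h1]
    refine foldl_fix _ _ _ ?_
    intro b hbmem d'
    have hbm := (PySem.List.mem_pyRange_one).1 hbmem
    exact stepA_noop n_start n_end d' a b (b_big n_end a b hn (by omega))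
  · rw [PySem.List.pyRange_one_eq_nil (a := a + 1) (b := r + 1) (by omega)]
    simp only [List.foldl_nil]
    refine foldl_fix _ _ _ ?_
    intro b hbmem d'
    have hbm := (PySem.List.mem_pyRange_one).1 hbmem
    exact stepA_noop n_start n_end d' a b (b_big n_end a b hn (by omega))

-- ===== VERDICT (by name: the statement is the Claim_ definition above) =====
theorem compute_max_y_spec : Claim_equal_compute_max_y := by
  intro n_start n_end _ hpre
  unfold Spec_compute_max_y
  simp only [compute_max_y, compute_max_y_alt]
  rw [outerB_eq_fold]
  have hn : (0 : Int) ≤ n_end := hpre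
  set r := pyIsqrt n_end with hr
  set half := PySem.Int.floordiv n_end 2 with hhalf
  have hr0 : 0 ≤ r := by simp [hr, pyIsqrt]
  have hhalf0 : 0 ≤ half := by
    have h1 := PySem.Int.floordiv_mul_add_mod n_end 2
    have h2 := PySem.Int.mod_lt n_end (b := 2) (by norm_num)
    rw [hhalf]; omega
  set M : Int := max half (r + 1) with hM
  have hM1 : 1 ≤ M := by omega
  -- A's outer step is a no-op for a ≥ half (and 0 ≤ a)
  have outer_noopA : ∀ a : Int, 0 ≤ a → half ≤ a → ∀ d : PySem.Dict Int Int,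
      (PySem.List.pyRange (a + 1) (a + 1 + r) 1).foldl
        (fun d b => stepA n_start n_end d a b) d = d := by
    intro a ha0 hha d
    refine foldl_fix _ _ _ ?_
    intro b hbmem d'
    have hbm := (PySem.List.mem_pyRange_one).1 hbmem
    exact stepA_noop n_start n_end d' a b (a_big n_end a b ha0 hha (by omega))
  -- A: pad the outer range from n_end//2 up to M, then peel off a = 0
  have eqA : (PySem.List.pyRange 0 half 1).foldl
      (fun d a => (PySem.List.pyRange (a + 1) (a + 1 + r) 1).foldl
        (fun d b => stepA n_start n_end d a b) d) PySem.Dict.empty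
      = (PySem.List.pyRange 1 M 1).foldl
      (fun d a => (PySem.List.pyRange (a + 1) (a + 1 + r) 1).foldl
        (fun d b => stepA n_start n_end d a b) d) PySem.Dict.empty := by
    have hsplit : PySem.List.pyRange 0 M 1
        = PySem.List.pyRange 0 half 1 ++ PySem.List.pyRange half M 1 :=
      PySem.List.pyRange_one_append 0 half M hhalf0 (by omega)
    have hpad : (PySem.List.pyRange 0 M 1).foldl
        (fun d a => (PySem.List.pyRange (a + 1) (a + 1 + r) 1).foldl
          (fun d b => stepA n_start n_end d a b) d) PySem.Dict.empty
        = (PySem.List.pyRange 0 half 1).foldl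
        (fun d a => (PySem.List.pyRange (a + 1) (a + 1 + r) 1).foldl
          (fun d b => stepA n_start n_end d a b) d) PySem.Dict.empty := by
      rw [hsplit, List.foldl_append]
      refine foldl_fix _ _ _ ?_
      intro a hamem d'
      have ham := (PySem.List.mem_pyRange_one).1 hamem
      exact outer_noopA a (by omega) ham.1 d'
    rw [← hpad, PySem.List.pyRange_one_cons (by omega : (0:Int) < M)]
    simp only [List.foldl_cons]
    congr 1
    refine foldl_fix _ _ _ ?_
    intro b _ d'
    exact stepA_zero n_start n_end d' b
  -- B: pad the outer range from isqrt(n_end)+1 up to M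
  have eqB : (PySem.List.pyRange 1 (r + 1) 1).foldl
      (fun d a => innerB n_start n_end r a (a + 1) d) PySem.Dict.empty
      = (PySem.List.pyRange 1 M 1).foldl
      (fun d a => innerB n_start n_end r a (a + 1) d) PySem.Dict.empty := by
    rw [PySem.List.pyRange_one_append 1 (r + 1) M (by omega) (by omega),
      List.foldl_append]
    refine (foldl_fix _ _ _ ?_).symm
    intro a hamem d'
    have ham := (PySem.List.mem_pyRange_one).1 hamem
    rw [innerB_eq_fold, PySem.List.pyRange_one_eq_nil (by omega : r + 1 ≤ a + 1)]
    rfl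
  rw [eqA, eqB]
  refine congrArg PySem.Dict.items (PySem.List.foldl_congr_mem _ _ _ _ ?_)
  intro acc a hamem
  have ham := (PySem.List.mem_pyRange_one).1 hamem
  exact inner_eq n_start n_end hn a ham.1 acc
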